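-- pv_equiv track=rewrite | github.com/kfklaihk/Works | parse_mappings_colab_10.py | split_union_all
-- ===== SOURCE A (Python) =====
-- def split_union_all(sql):
--     parts = []
--     depth = 0
--     start = 0
--     i = 0
--     sql_lower = sql.lower()
--     while i < len(sql):
--         c = sql[i]
--         if c == '(':
--             depth += 1
--         elif c == ')':
--             depth -= 1
--         elif depth == 0 and sql_lower.startswith('union all', i):
--             parts.append(sql[start:i].strip())
--             i += len('union all')
--             start = i
--             continue
--         i += 1
--     tail = sql[start:].strip()
--     if tail:
--         parts.append(tail)
--     return parts
-- ===== SOURCE B (Python) =====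
-- def split_union_all(sql):
--     sql_lower = sql.lower()
--     parts = []
--     depth = 0
--     start = 0
--     pos = 0
--     while True:
--         j = sql_lower.find('union all', pos)
--         if j == -1:
--             break
--         seg = sql[pos:j]
--         depth += seg.count('(') - seg.count(')')
--         if depth == 0:
--             parts.append(sql[start:j].strip())
--             start = j + 9
--             pos = j + 9
--         else:
--             pos = j + 1  # candidate nested in parens; keep scanning after it
--     tail = sql[start:].strip()
--     if tail:
--         parts.append(tail)
--     return parts
-- ===== Notes on version B (the rewrite author's own statement) =====
-- stated objective: faster
-- what changed: B replaces A's per-character Python loop (with a 9-character startswith test at every index) by an outer loop over str.find matches of the lowercased keyword, adding the parenthesis balance of each skipped segment via str.count and splitting when the running balance is 0.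
import Mathlib
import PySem

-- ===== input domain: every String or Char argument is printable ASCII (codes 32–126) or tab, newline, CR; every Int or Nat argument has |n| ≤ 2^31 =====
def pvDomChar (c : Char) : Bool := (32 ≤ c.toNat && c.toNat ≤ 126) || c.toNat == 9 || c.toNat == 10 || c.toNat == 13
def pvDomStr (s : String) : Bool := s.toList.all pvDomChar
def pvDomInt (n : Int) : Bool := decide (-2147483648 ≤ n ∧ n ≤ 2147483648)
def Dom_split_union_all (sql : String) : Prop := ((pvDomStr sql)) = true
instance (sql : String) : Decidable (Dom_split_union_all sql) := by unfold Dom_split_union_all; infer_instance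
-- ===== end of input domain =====

-- B re-implements the top-level UNION ALL splitter by jumping between str.find matches
-- (counting parens per skipped segment via str.count) instead of scanning every character;
-- objective: faster (constant-factor, measured: bulk C-level scans).

-- the literal 'union all' (both Pythons spell it inline)
def pvUall : List Char := ['u', 'n', 'i', 'o', 'n', ' ', 'a', 'l', 'l']

-- ===== PORT A =====
-- A's while loop, state (parts, depth, start, i); strings handled as List Char (PySem.Chars).
-- sql[start:i] → PySem.List.slice; sql_lower.startswith('union all', i) with 0 ≤ i is
-- PySem.Chars.startswith on low.drop i (exact); len('union all') = 9.
def splitA_loop (cs low : List Char) (parts : List String) (depth : Int) (start i : Nat) :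
    List String :=
  if h : i < cs.length then
    let c := cs[i]
    if c = '(' then splitA_loop cs low parts (depth + 1) start (i + 1)
    else if c = ')' then splitA_loop cs low parts (depth - 1) start (i + 1)
    else if depth = 0 ∧ PySem.Chars.startswith (low.drop i) pvUall = true then
      splitA_loop cs low
        (parts ++ [String.ofList (PySem.Chars.strip
          (PySem.List.slice cs (some (start : Int)) (some (i : Int))))])
        depth (i + 9) (i + 9)
    else splitA_loop cs low parts depth start (i + 1)
  else
    -- tail = sql[start:].strip(); if tail: parts.append(tail)
    let tail := PySem.Chars.strip (PySem.List.slice cs (some (start : Int)) none)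
    if tail = [] then parts else parts ++ [String.ofList tail]
termination_by cs.length - i
decreasing_by all_goals omega

def split_union_all (sql : String) : List String :=
  splitA_loop sql.toList (PySem.Chars.lower sql.toList) [] 0 0 0

-- ===== PORT B =====
-- facts about str.find(sub, pos) needed for B's loop termination (cited in decreasing_by)
theorem pv_findFrom_bounds (low sub : List Char) (pos : Nat)
    (h : ¬ PySem.Chars.findFrom low sub (pos : Int) none = -1) :
    pos ≤ low.length ∧ 0 ≤ PySem.Chars.findFrom low sub (pos : Int) none ∧
    pos ≤ (PySem.Chars.findFrom low sub (pos : Int) none).toNat ∧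
    sub <+: low.drop (PySem.Chars.findFrom low sub (pos : Int) none).toNat ∧
    ∀ i, pos ≤ i → i < (PySem.Chars.findFrom low sub (pos : Int) none).toNat →
      ¬ sub <+: low.drop i := by
  by_cases hp : pos ≤ low.length
  · obtain ⟨h1, h2, h3⟩ := PySem.Chars.findFrom_natCast_spec low sub pos hp h
    have h0 : (0:Int) ≤ PySem.Chars.findFrom low sub (pos : Int) none := le_trans (by positivity) h1
    exact ⟨hp, h0, by omega, h2, h3⟩
  · exfalso; apply h
    simp only [PySem.Chars.findFrom]
    rw [if_pos]
    split
    · omega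
    · omega

theorem pv_findFrom_len (low sub : List Char) (pos : Nat) (hs : sub.length = 9)
    (h : ¬ PySem.Chars.findFrom low sub (pos : Int) none = -1) :
    pos ≤ (PySem.Chars.findFrom low sub (pos : Int) none).toNat ∧
    (PySem.Chars.findFrom low sub (pos : Int) none).toNat + 9 ≤ low.length := by
  obtain ⟨h1, h2, h3, h4, -⟩ := pv_findFrom_bounds low sub pos h
  refine ⟨h3, ?_⟩
  have := h4.length_le
  simp [List.length_drop, hs] at this
  omega

-- B's while loop: jump to the next 'union all' via str.find, add the paren balance of the
-- skipped segment via str.count, split when the balance is 0.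
-- sql_lower.find('union all', pos) → PySem.Chars.findFrom; seg.count('(') → PySem.Chars.count.
def splitB_loop (cs low : List Char) (parts : List String) (depth : Int) (start pos : Nat) :
    List String :=
  let j := PySem.Chars.findFrom low pvUall (pos : Int) none
  if hj : j = -1 then
    -- tail = sql[start:].strip(); if tail: parts.append(tail)
    let tail := PySem.Chars.strip (PySem.List.slice cs (some (start : Int)) none)
    if tail = [] then parts else parts ++ [String.ofList tail]
  else
    let seg := PySem.List.slice cs (some (pos : Int)) (some j)
    let depth' := depth + ((PySem.Chars.count seg ['('] : Int) - (PySem.Chars.count seg [')'] : Int))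
    if depth' = 0 then
      splitB_loop cs low
        (parts ++ [String.ofList (PySem.Chars.strip
          (PySem.List.slice cs (some (start : Int)) (some j)))])
        depth' (j.toNat + 9) (j.toNat + 9)
    else splitB_loop cs low parts depth' start (j.toNat + 1)
termination_by low.length - pos
decreasing_by
  · have := pv_findFrom_len low pvUall pos (by decide) hj
    omega
  · have := pv_findFrom_len low pvUall pos (by decide) hj
    omega

def split_union_all_alt (sql : String) : List String :=
  splitB_loop sql.toList (PySem.Chars.lower sql.toList) [] 0 0 0

-- ===== PRECONDITION & SPEC =====
def Spec_split_union_all (sql : String) (out : List String) : Prop := out = split_union_all_alt sql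
instance (sql : String) (out : List String) : Decidable (Spec_split_union_all sql out) := by unfold Spec_split_union_all; infer_instance

-- ===== CLAIM (what is proved, stated in full; the proofs are below) =====
def Claim_equal_split_union_all : Prop := ∀ (sql : String), Dom_split_union_all sql → Spec_split_union_all sql (split_union_all sql)

-- ===== LEMMAS AND PROOFS =====

-- paren balance of a segment, as B computes it
def pvBal (seg : List Char) : Int := (seg.count '(' : Int) - (seg.count ')' : Int)

theorem pvBal_cons_open (s : List Char) : pvBal ('(' :: s) = 1 + pvBal s := by
  simp [pvBal]; ring

theorem pvBal_cons_close (s : List Char) : pvBal (')' :: s) = -1 + pvBal s := by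
  simp [pvBal]; ring

theorem pvBal_cons_other (c : Char) (s : List Char) (h1 : ¬ c = '(') (h2 : ¬ c = ')') :
    pvBal (c :: s) = pvBal s := by
  simp [pvBal, h1, h2]

theorem pv_count_single_go (c : Char) :
    ∀ (fuel : Nat) (l : List Char) (acc : Nat), l.length ≤ fuel →
      PySem.Chars.count.go [c] fuel l acc = acc + l.count c := by
  intro fuel
  induction fuel with
  | zero =>
    intro l acc hl
    obtain rfl : l = [] := List.eq_nil_of_length_eq_zero (Nat.le_zero.mp hl)
    simp [PySem.Chars.count.go]
  | succ n ih =>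
    intro l acc hl
    cases l with
    | nil => simp [PySem.Chars.count.go]
    | cons hd t =>
      simp only [PySem.Chars.count.go]
      by_cases hc : c = hd
      · subst hc
        rw [if_pos (by simp [List.isPrefixOf])]
        simp only [List.length_cons] at hl
        rw [ih _ _ (by simpa using Nat.le_of_succ_le_succ hl)]
        simp
        omega
      · rw [if_neg (by simp [List.isPrefixOf, hc])]
        simp only [List.length_cons] at hl
        rw [ih _ _ (by omega)]
        simp [Ne.symm hc]

theorem pv_count_single (s : List Char) (c : Char) :
    PySem.Chars.count s [c] = s.count c := by
  simp [PySem.Chars.count, pv_count_single_go c s.length s 0 le_rfl]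

theorem pv_match_not_paren (cs : List Char) (j : Nat)
    (h : pvUall <+: (PySem.Chars.lower cs).drop j) (hj : j < cs.length) :
    ¬ cs[j] = '(' ∧ ¬ cs[j] = ')' := by
  obtain ⟨t, ht⟩ := h
  have hlen : (PySem.Chars.lower cs).length = cs.length := by simp [PySem.Chars.lower]
  have hu : (PySem.Chars.lower cs)[j]'(by omega) = 'u' := by
    have h0 : ((PySem.Chars.lower cs).drop j)[0]'(by rw [← ht]; simp [pvUall]) = (PySem.Chars.lower cs)[j]'(by omega) := by
      simp [List.getElem_drop]
    rw [← h0]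
    simp [← ht, pvUall]
  rw [show (PySem.Chars.lower cs)[j]'(by omega) = PySem.Chars.lowerChar (cs[j]'hj) by
    simp [PySem.Chars.lower]] at hu
  constructor <;> intro hc <;> rw [hc] at hu <;> exact absurd hu (by decide)

-- a prefix match further right is still an infix of the earlier drop
theorem pv_prefix_drop_infix (sub low : List Char) (pos p : Nat) (hp : pos ≤ p)
    (h : sub <+: low.drop p) : sub <:+: low.drop pos := by
  have hd : low.drop p = (low.drop pos).drop (p - pos) := by
    rw [List.drop_drop]; congr 1; omega
  rw [hd] at h
  exact h.isInfix.trans (List.drop_suffix _ _).isInfix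

-- A's loop scans match-free ground by only accumulating the paren balance
theorem pv_A_skip (cs low : List Char) (_hlow : low = PySem.Chars.lower cs) :
    ∀ (m i : Nat) (parts : List String) (depth : Int) (start : Nat),
      i + m ≤ cs.length →
      (∀ p, i ≤ p → p < i + m → ¬ pvUall <+: low.drop p) →
      splitA_loop cs low parts depth start i =
        splitA_loop cs low parts (depth + pvBal (List.take m (List.drop i cs))) start (i + m) := by
  intro m
  induction m with
  | zero => intro i parts depth start _ _; simp [pvBal]
  | succ m ih =>
    intro i parts depth start hlen hnm
    have hi : i < cs.length := by omega
    have hcons : List.take (m + 1) (List.drop i cs) = cs[i] :: List.take m (List.drop (i + 1) cs) := by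
      rw [List.drop_eq_getElem_cons hi, List.take_succ_cons]
    have hstep : ∀ p, i + 1 ≤ p → p < i + 1 + m → ¬ pvUall <+: low.drop p := by
      intro p h1 h2; exact hnm p (by omega) (by omega)
    conv_lhs => rw [splitA_loop]
    simp only [dif_pos hi]
    by_cases hc1 : cs[i] = '('
    · rw [if_pos hc1, ih (i + 1) parts (depth + 1) start (by omega) hstep]
      have hdep : depth + pvBal (List.take (m + 1) (List.drop i cs)) =
          depth + 1 + pvBal (List.take m (List.drop (i + 1) cs)) := by
        rw [hcons, hc1, pvBal_cons_open]; ring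
      rw [hdep, show i + (m + 1) = i + 1 + m from by omega]
    · rw [if_neg hc1]
      by_cases hc2 : cs[i] = ')'
      · rw [if_pos hc2, ih (i + 1) parts (depth - 1) start (by omega) hstep]
        have hdep : depth + pvBal (List.take (m + 1) (List.drop i cs)) =
            depth - 1 + pvBal (List.take m (List.drop (i + 1) cs)) := by
          rw [hcons, hc2, pvBal_cons_close]; ring
        rw [hdep, show i + (m + 1) = i + 1 + m from by omega]
      · rw [if_neg hc2]
        rw [if_neg (fun hand => hnm i le_rfl (by omega)
          ((PySem.Chars.startswith_iff _ _).mp hand.2))]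
        rw [ih (i + 1) parts depth start (by omega) hstep]
        have hdep : depth + pvBal (List.take (m + 1) (List.drop i cs)) =
            depth + pvBal (List.take m (List.drop (i + 1) cs)) := by
          rw [hcons, pvBal_cons_other _ _ hc1 hc2]
        rw [hdep, show i + (m + 1) = i + 1 + m from by omega]

-- with no match ahead, A's loop just emits the tail
theorem pv_A_noMatch (cs low : List Char) (hlow : low = PySem.Chars.lower cs)
    (i : Nat) (parts : List String) (depth : Int) (start : Nat) (hi : i ≤ cs.length)
    (hnm : ∀ p, i ≤ p → ¬ pvUall <+: low.drop p) :
    splitA_loop cs low parts depth start i =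
      (let tail := PySem.Chars.strip (PySem.List.slice cs (some (start : Int)) none)
       if tail = [] then parts else parts ++ [String.ofList tail]) := by
  have hnm' : ∀ p, i ≤ p → p < i + (cs.length - i) → ¬ pvUall <+: low.drop p :=
    fun p h1 _ => hnm p h1
  rw [pv_A_skip cs low hlow (cs.length - i) i parts depth start (by omega) hnm']
  rw [show i + (cs.length - i) = cs.length from by omega]
  conv_lhs => rw [splitA_loop]
  simp only [dif_neg (lt_irrefl cs.length)]

-- at a depth-0 match A emits a part and jumps over the 9 matched characters
theorem pv_A_accept (cs low : List Char) (hlow : low = PySem.Chars.lower cs)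
    (j : Nat) (parts : List String) (start : Nat)
    (h : pvUall <+: low.drop j) :
    splitA_loop cs low parts 0 start j =
      splitA_loop cs low
        (parts ++ [String.ofList (PySem.Chars.strip
          (PySem.List.slice cs (some (start : Int)) (some (j : Int))))])
        0 (j + 9) (j + 9) := by
  have hlen : low.length = cs.length := by simp [hlow, PySem.Chars.lower]
  have hl9 : pvUall.length = 9 := by decide
  have h9 : j + 9 ≤ cs.length := by
    have := h.length_le
    simp [List.length_drop, hl9] at this
    omega
  have hj : j < cs.length := by omega
  obtain ⟨hp1, hp2⟩ := pv_match_not_paren cs j (hlow ▸ h) hj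
  conv_lhs => rw [splitA_loop]
  simp only [dif_pos hj, if_neg hp1, if_neg hp2]
  simp [PySem.Chars.startswith_iff, h]

-- at a nested match A just steps over the 'u'
theorem pv_A_reject (cs low : List Char) (hlow : low = PySem.Chars.lower cs)
    (j : Nat) (parts : List String) (depth : Int) (start : Nat)
    (h : pvUall <+: low.drop j) (hd : ¬ depth = 0) :
    splitA_loop cs low parts depth start j =
      splitA_loop cs low parts depth start (j + 1) := by
  have hlen : low.length = cs.length := by simp [hlow, PySem.Chars.lower]
  have hl9 : pvUall.length = 9 := by decide
  have h9 : j + 9 ≤ cs.length := by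
    have := h.length_le
    simp [List.length_drop, hl9] at this
    omega
  have hj : j < cs.length := by omega
  obtain ⟨hp1, hp2⟩ := pv_match_not_paren cs j (hlow ▸ h) hj
  conv_lhs => rw [splitA_loop]
  simp only [dif_pos hj, if_neg hp1, if_neg hp2]
  simp [hd]

theorem pv_main (cs low : List Char) (hlow : low = PySem.Chars.lower cs) :
    ∀ (fuel pos : Nat) (parts : List String) (depth : Int) (start : Nat),
      cs.length - pos < fuel → pos ≤ cs.length →
      splitA_loop cs low parts depth start pos = splitB_loop cs low parts depth start pos := by
  have hlen : low.length = cs.length := by simp [hlow, PySem.Chars.lower]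
  intro fuel
  induction fuel with
  | zero => intro pos _ _ _ hf _; omega
  | succ fuel ih =>
    intro pos parts depth start hf hp
    conv_rhs => rw [splitB_loop]
    by_cases hj : PySem.Chars.findFrom low pvUall (pos : Int) none = -1
    · rw [dif_pos hj]
      have hinf : ¬ pvUall <:+: low.drop pos :=
        (PySem.Chars.findFrom_natCast_eq_neg_one_iff low pvUall pos (by omega)).mp hj
      exact pv_A_noMatch cs low hlow pos parts depth start (by omega)
        (fun p hpp hpre => hinf (pv_prefix_drop_infix _ _ _ _ hpp hpre))
    · rw [dif_neg hj]
      obtain ⟨hb1, hb2, hb3, hb4, hb5⟩ := pv_findFrom_bounds low pvUall pos hj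
      obtain ⟨jn, hjn⟩ : ∃ jn : Nat, PySem.Chars.findFrom low pvUall (pos : Int) none = (jn : Int) :=
        ⟨_, (Int.toNat_of_nonneg hb2).symm⟩
      rw [hjn] at hb3 hb4 hb5 ⊢
      simp only [Int.toNat_natCast] at hb3 hb4 hb5 ⊢
      show splitA_loop cs low parts depth start pos = _
      have hl9 : pvUall.length = 9 := by decide
      have h9 : jn + 9 ≤ cs.length := by
        have := hb4.length_le
        simp [List.length_drop, hl9] at this
        omega
      rw [PySem.List.slice_natCast, pv_count_single, pv_count_single]
      have hskip := pv_A_skip cs low hlow (jn - pos) pos parts depth start (by omega)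
        (fun p h1 h2 => hb5 p h1 (by omega))
      rw [show pos + (jn - pos) = jn from by omega] at hskip
      rw [hskip]
      have hbal : pvBal (List.take (jn - pos) (List.drop pos cs)) =
          ((List.take (jn - pos) (List.drop pos cs)).count '(' : Int) -
          ((List.take (jn - pos) (List.drop pos cs)).count ')' : Int) := rfl
      by_cases hd : depth + (((List.take (jn - pos) (List.drop pos cs)).count '(' : Int) -
          ((List.take (jn - pos) (List.drop pos cs)).count ')' : Int)) = 0
      · rw [if_pos hd]
        rw [hbal, hd]
        rw [pv_A_accept cs low hlow jn parts start hb4]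
        exact ih (jn + 9) _ _ _ (by omega) (by omega)
      · rw [if_neg hd]
        rw [hbal]
        rw [pv_A_reject cs low hlow jn parts _ start hb4 hd]
        exact ih (jn + 1) _ _ _ (by omega) (by omega)

-- ===== VERDICT (by name: the statement is the Claim_ definition above) =====
theorem split_union_all_spec : Claim_equal_split_union_all := by
  intro sql _
  unfold Spec_split_union_all split_union_all split_union_all_alt
  exact pv_main sql.toList _ rfl (sql.toList.length + 1) 0 [] 0 0 (by omega) (by omega)
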